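-- pv_equiv track=rewrite | github.com/Advanced-AIgpt/Yandex-Full-Source | alice/boltalka/tools/dssm_preprocessing/preprocessing/lib/main.py | remove_unbalanced_braces
-- ===== SOURCE A (Python) =====
-- def remove_unbalanced_braces(s):
--     openning = '([{'
--     closing = ')]}'
--     match = dict(zip(openning, closing))
--     stack = [None] * len(s)
--     stack_top = 0
--     delete = [False] * len(s)
--     for i, c in enumerate(s):
--         if c in openning:
--             stack[stack_top] = (c, i)
--             stack_top += 1
--             continue
--         if c in closing:
--             if stack_top == 0 or match[stack[stack_top - 1][0]] != c:
--                 delete[i] = True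
--                 continue
--             stack_top -= 1
--
--     while stack_top > 0:
--         c, i = stack[stack_top - 1]
--         stack_top -= 1
--         delete[i] = True
--
--     return ''.join(c for i, c in enumerate(s) if not delete[i])
-- ===== SOURCE B (Python) =====
-- def remove_unbalanced_braces(s):
--     # Single pass building the kept text directly: `done` holds finished text,
--     # `stack` holds (opener, segment-of-kept-chars-after-it).  A matched closer
--     # merges its whole group into the enclosing segment; an unmatched closer is
--     # skipped; unmatched openers simply never contribute their opener char.
--     match = {')': '(', ']': '[', '}': '{'}
--     done = []
--     stack = []
--     for c in s:
--         if c in '([{':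
--             stack.append((c, []))
--         elif c in ')]}':
--             if stack and stack[-1][0] == match[c]:
--                 o, seg = stack.pop()
--                 tgt = stack[-1][1] if stack else done
--                 tgt.append(o)
--                 tgt.extend(seg)
--                 tgt.append(c)
--             # unmatched closer: dropped
--         else:
--             (stack[-1][1] if stack else done).append(c)
--     for _, seg in stack:   # unmatched openers: keep their contents, not the opener
--         done.extend(seg)
--     return ''.join(done)
-- ===== Notes on version B (the rewrite author's own statement) =====
-- stated objective: alternative
-- what changed: B builds the kept text directly in one pass (finished text plus a stack of (opener, pending segment), merging a group on a matching closer and never emitting unmatched opener chars), instead of A's preallocated stack with a delete-flag array followed by a second enumerate-and-filter scan.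
import Mathlib
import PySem

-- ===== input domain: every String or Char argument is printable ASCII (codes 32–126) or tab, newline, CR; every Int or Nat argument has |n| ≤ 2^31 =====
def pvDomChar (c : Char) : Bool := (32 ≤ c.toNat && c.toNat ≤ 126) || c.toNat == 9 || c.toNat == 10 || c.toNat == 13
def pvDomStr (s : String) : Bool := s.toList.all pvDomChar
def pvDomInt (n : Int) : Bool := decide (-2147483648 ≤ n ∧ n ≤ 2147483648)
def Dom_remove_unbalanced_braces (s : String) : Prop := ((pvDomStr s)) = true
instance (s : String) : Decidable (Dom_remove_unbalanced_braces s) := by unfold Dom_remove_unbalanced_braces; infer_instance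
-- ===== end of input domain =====

-- B builds the kept text in one pass (finished text + stack of (opener, segment)),
-- instead of A's delete-flag array plus a second filtering scan; objective: alternative.

-- ===== PORT A =====
def pvAOpen : List Char := ['(', '[', '{']      -- openning = '([{'
def pvAClose : List Char := [')', ']', '}']     -- closing = ')]}'
def pvAMatch : PySem.Dict Char Char := PySem.Dict.ofList (List.zip pvAOpen pvAClose)
-- Python's preallocated `stack` array with `stack_top` behaves as a stack (top at head here);
-- the `delete` boolean array is modeled as Int → Bool (delete[i] = True is a pointwise
-- update, reads are by index only — exact for this index-based use).
-- `match[stack[stack_top-1][0]]` can never raise (stack holds openers), ported via get?/getD.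
def pvAStep (st : List (Char × Int) × (Int → Bool)) (ic : Int × Char) :
    List (Char × Int) × (Int → Bool) :=
  if pvAOpen.contains ic.2 then ((ic.2, ic.1) :: st.1, st.2)
  else if pvAClose.contains ic.2 then
    match st.1 with
    | [] => (st.1, fun j => if j = ic.1 then true else st.2 j)
    | (o, _) :: rest =>
      if ((pvAMatch.get? o).getD ' ') ≠ ic.2 then
        (st.1, fun j => if j = ic.1 then true else st.2 j)
      else (rest, st.2)
  else st

def remove_unbalanced_braces (s : String) : String :=
  let r := (PySem.List.enumerate s.toList 0).foldl pvAStep ([], fun _ => false)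
  -- the final while-loop: mark every opener still on the stack as deleted
  let delete := r.1.foldl (fun d (ci : Char × Int) => fun j => if j = ci.2 then true else d j) r.2
  String.ofList ((PySem.List.enumerate s.toList 0).filterMap
    (fun ic => if delete ic.1 then none else some ic.2))

-- ===== PORT B =====
def pvBMatch : PySem.Dict Char Char := PySem.Dict.ofList [(')', '('), (']', '['), ('}', '{')]
-- state: (done, stack); stack top at head, each entry (opener, kept chars after it)
def pvBStep (st : List Char × List (Char × List Char)) (c : Char) :
    List Char × List (Char × List Char) :=
  if pvAOpen.contains c then (st.1, (c, []) :: st.2)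
  else if pvAClose.contains c then
    match st.2 with
    | [] => st
    | (o, seg) :: rest =>
      if ((pvBMatch.get? c).getD ' ') = o then
        match rest with
        | [] => (st.1 ++ o :: (seg ++ [c]), [])
        | (o2, seg2) :: rest2 => (st.1, (o2, seg2 ++ o :: (seg ++ [c])) :: rest2)
      else st
  else
    match st.2 with
    | [] => (st.1 ++ [c], st.2)
    | (o2, seg2) :: rest => (st.1, (o2, seg2 ++ [c]) :: rest)

def remove_unbalanced_braces_alt (s : String) : String :=
  let r := s.toList.foldl pvBStep ([], [])
  -- unmatched openers: keep their contents (bottom-to-top), drop the opener chars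
  String.ofList (r.1 ++ r.2.foldl (fun acc (e : Char × List Char) => e.2 ++ acc) [])

-- ===== PRECONDITION & SPEC =====
def Spec_remove_unbalanced_braces (s : String) (out : String) : Prop := out = remove_unbalanced_braces_alt s
instance (s : String) (out : String) : Decidable (Spec_remove_unbalanced_braces s out) := by unfold Spec_remove_unbalanced_braces; infer_instance

-- ===== CLAIM (what is proved, stated in full; the proofs are below) =====
def Claim_equal_remove_unbalanced_braces : Prop := ∀ (s : String), Dom_remove_unbalanced_braces s → Spec_remove_unbalanced_braces s (remove_unbalanced_braces s)

-- ===== LEMMAS AND PROOFS =====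

-- the segments of the B-stack, bottom-to-top, without the opener chars (B's final flatten)
def pvSegs (l : List (Char × List Char)) : List Char :=
  l.foldl (fun acc (e : Char × List Char) => e.2 ++ acc) []

-- the segments with their opener chars, bottom-to-top
def pvFulls (l : List (Char × List Char)) : List Char :=
  l.foldl (fun acc (e : Char × List Char) => (e.1 :: e.2) ++ acc) []

-- A's keep/kill filter: a char is dropped if its delete flag is set or its index
-- belongs to one of the given stack entries
def pvKill (D : Int → Bool) (dead : List (Char × Int)) (ic : Int × Char) : Option Char :=
  if D ic.1 || dead.any (fun e => e.2 = ic.1) then none else some ic.2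

lemma pvFoldl_prep {α : Type} (g : α → List Char) (l : List α) (acc : List Char) :
    l.foldl (fun a e => g e ++ a) acc = l.foldl (fun a e => g e ++ a) [] ++ acc := by
  induction l generalizing acc with
  | nil => simp
  | cons e l ih => simp only [List.foldl_cons]; rw [ih, ih (g e ++ [])]; simp

lemma pvSegs_cons (e : Char × List Char) (l : List (Char × List Char)) :
    pvSegs (e :: l) = pvSegs l ++ e.2 := by
  unfold pvSegs
  simp only [List.foldl_cons]
  rw [pvFoldl_prep (fun e : Char × List Char => e.2) l (e.2 ++ [])]
  simp

lemma pvFulls_cons (e : Char × List Char) (l : List (Char × List Char)) :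
    pvFulls (e :: l) = pvFulls l ++ (e.1 :: e.2) := by
  unfold pvFulls
  simp only [List.foldl_cons]
  rw [pvFoldl_prep (fun e : Char × List Char => e.1 :: e.2) l ((e.1 :: e.2) ++ [])]
  simp

lemma pvMark_spec (l : List (Char × Int)) (D : Int → Bool) (j : Int) :
    (l.foldl (fun d (ci : Char × Int) => fun j => if j = ci.2 then true else d j) D) j
      = (D j || l.any (fun e => e.2 = j)) := by
  induction l generalizing D with
  | nil => simp
  | cons e l ih =>
    simp only [List.foldl_cons, List.any_cons, ih]
    by_cases h : j = e.2
    · simp [h]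
    · have h' : ¬ (e.2 = j) := fun hh => h hh.symm
      simp [h, h']

lemma pvMatch_iff (o c : Char) (ho : o ∈ pvAOpen) (hc : c ∈ pvAClose) :
    (((pvAMatch.get? o).getD ' ') = c) ↔ (((pvBMatch.get? c).getD ' ') = o) := by
  fin_cases ho <;> fin_cases hc <;> decide


lemma pvKill_update (D : Int → Bool) (dead : List (Char × Int)) (k : Int) (ic : Int × Char)
    (h : ic.1 ≠ k) :
    pvKill (fun j => if j = k then true else D j) dead ic = pvKill D dead ic := by
  unfold pvKill; simp [h]

lemma pvKill_cons (D : Int → Bool) (dead : List (Char × Int)) (e : Char × Int) (ic : Int × Char)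
    (h : e.2 ≠ ic.1) :
    pvKill D (e :: dead) ic = pvKill D dead ic := by
  unfold pvKill; simp [h]

lemma pvKill_keep (D : Int → Bool) (dead : List (Char × Int)) (k : Int) (c : Char)
    (hD : D k = false) (hd : ∀ e ∈ dead, e.2 ≠ k) :
    pvKill D dead (k, c) = some c := by
  unfold pvKill
  have : dead.any (fun e => e.2 = k) = false := by
    simp only [List.any_eq_false, decide_eq_true_eq]; exact hd
  simp [hD, this]

lemma pvKill_kill_head (D : Int → Bool) (dead : List (Char × Int)) (o c : Char) (k : Int) :
    pvKill D ((o, k) :: dead) (k, c) = none := by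
  unfold pvKill; simp

-- The main invariant-preservation lemma.  State relation between A's fold state
-- (stack of (opener, index), delete flags) after a processed prefix p and B's fold
-- state (done, stack of (opener, segment)): same opener chars on both stacks, and for
-- every split point q of the stack, filtering p with the flags plus the bottom
-- (all-but-top-q) stack indices killed yields done ++ segments(bottom) ++ fulls(top q).
lemma pvMain (rest : List Char) (k : Int) (p : List (Int × Char))
    (stA : List (Char × Int)) (D : Int → Bool)
    (done : List Char) (stB : List (Char × List Char))
    (hp : ∀ ic ∈ p, ic.1 < k)
    (hst : ∀ e ∈ stA, e.2 < k)
    (hD : ∀ j, k ≤ j → D j = false)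
    (hrel : List.Forall₂ (fun (a : Char × Int) (b : Char × List Char) =>
        a.1 = b.1 ∧ a.1 ∈ pvAOpen) stA stB)
    (hkept : ∀ q : Nat, p.filterMap (pvKill D (stA.drop q)) =
        done ++ pvSegs (stB.drop q) ++ pvFulls (stB.take q)) :
    (let r := (PySem.List.enumerate rest k).foldl pvAStep (stA, D);
     let delete := r.1.foldl (fun d (ci : Char × Int) => fun j => if j = ci.2 then true else d j) r.2;
     (p ++ PySem.List.enumerate rest k).filterMap
       (fun ic => if delete ic.1 then none else some ic.2))
    = (let rB := rest.foldl pvBStep (done, stB);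
       rB.1 ++ rB.2.foldl (fun acc (e : Char × List Char) => e.2 ++ acc) []) := by
  induction rest generalizing k p stA D done stB with
  | nil =>
    simp only [PySem.List.enumerate_nil, List.foldl_nil, List.append_nil]
    have h0 := hkept 0
    simp only [List.drop_zero, List.take_zero] at h0
    rw [List.filterMap_congr (g := pvKill D stA)
      (fun ic _ => by simp only [pvMark_spec]; rfl), h0]
    simp [pvFulls, pvSegs]
  | cons c rest ih =>
    simp only [PySem.List.enumerate_cons, List.foldl_cons]
    rw [List.append_cons]
    have hpk : ∀ ic ∈ p ++ [((k : Int), c)], ic.1 < k + 1 := by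
      intro ic hic
      rcases List.mem_append.1 hic with h | h
      · have := hp ic h; omega
      · simp only [List.mem_singleton] at h; rw [h]; omega
    have hDk : D k = false := hD k le_rfl
    by_cases hop : c ∈ pvAOpen
    · -- c is an opener: both sides push
      simp only [show pvAStep (stA, D) (k, c) = ((c, k) :: stA, D) by simp [pvAStep, hop]]
      simp only [show pvBStep (done, stB) c = (done, (c, []) :: stB) by
        simp [pvBStep, hop]]
      refine ih (k + 1) (p ++ [(k, c)]) ((c, k) :: stA, D).1 D done ((c, []) :: stB)
        hpk ?_ (fun j hj => hD j (by omega)) (List.Forall₂.cons ⟨rfl, hop⟩ hrel) ?_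
      · intro e he
        rcases List.mem_cons.1 he with h | h
        · rw [h]; omega
        · have := hst e h; omega
      · intro q
        cases q with
        | zero =>
          simp only [List.drop_zero, List.take_zero]
          rw [List.filterMap_append]
          have h1 : List.filterMap (pvKill D ((c, k) :: stA)) [((k : Int), c)] = [] := by
            simp [pvKill_kill_head]
          have h2 : List.filterMap (pvKill D ((c, k) :: stA)) p
              = List.filterMap (pvKill D stA) p := by
            apply List.filterMap_congr
            intro ic hic
            exact pvKill_cons D stA (c, k) ic (by have := hp ic hic; simp; omega)
          rw [h1, h2]
          have h0 := hkept 0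
          simp only [List.drop_zero, List.take_zero] at h0
          rw [h0, pvSegs_cons]
          simp [pvFulls, pvSegs]
        | succ q =>
          simp only [List.drop_succ_cons, List.take_succ_cons]
          rw [List.filterMap_append]
          have h1 : List.filterMap (pvKill D (stA.drop q)) [((k : Int), c)] = [c] := by
            have := pvKill_keep D (stA.drop q) k c hDk
              (fun e he => by have := hst e (List.mem_of_mem_drop he); omega)
            simp [this]
          rw [h1, hkept q, pvFulls_cons]
          simp
    · by_cases hcl : c ∈ pvAClose
      · -- c is a closer
        cases hrel with
        | nil =>
          simp only [show pvAStep (([] : List (Char × Int)), D) (k, c)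
              = ([], fun j => if j = k then true else D j) by simp [pvAStep, hop, hcl]]
          simp only [show pvBStep (done, ([] : List (Char × List Char))) c = (done, []) by
            simp [pvBStep, hop, hcl]]
          refine ih (k + 1) (p ++ [(k, c)]) [] (fun j => if j = k then true else D j) done []
            hpk (by simp) ?_ List.Forall₂.nil ?_
          · intro j hj
            have hne : ¬ j = k := by omega
            simp [hne, hD j (by omega)]
          · intro q
            simp only [List.drop_nil, List.take_nil]
            rw [List.filterMap_append]
            have h1 : List.filterMap (pvKill (fun j => if j = k then true else D j) []) [((k : Int), c)] = [] := by
              simp [pvKill]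
            have h2 : List.filterMap (pvKill (fun j => if j = k then true else D j) ([] : List (Char × Int))) p
                = List.filterMap (pvKill D []) p := by
              apply List.filterMap_congr
              intro ic hic
              exact pvKill_update D [] k ic (by have := hp ic hic; omega)
            rw [h1, h2]
            have := hkept q
            simp only [List.drop_nil, List.take_nil] at this
            rw [this]; simp
        | @cons a b l1 l2 hab htail =>
          obtain ⟨o, i⟩ := a
          obtain ⟨ob, seg⟩ := b
          obtain ⟨hoeq, homem⟩ := hab
          simp only at hoeq homem
          subst hoeq
          by_cases hm : ((pvAMatch.get? o).getD ' ') = c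
          · -- matching closer: pop / merge
            simp only [show pvAStep ((o, i) :: l1, D) (k, c) = (l1, D) by
              simp [pvAStep, hop, hcl, hm]]
            have hmB : ((pvBMatch.get? c).getD ' ') = o := (pvMatch_iff o c homem hcl).1 hm
            have hstl1 : ∀ e ∈ l1, e.2 < k + 1 := by
              intro e he; have := hst e (List.mem_cons_of_mem _ he); omega
            have hkeep : ∀ dead : List (Char × Int), (∀ e ∈ dead, e ∈ l1) →
                List.filterMap (pvKill D dead) [((k : Int), c)] = [c] := by
              intro dead hsub
              have := pvKill_keep D dead k c hDk
                (fun e he => by have := hst e (List.mem_cons_of_mem _ (hsub e he)); omega)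
              simp [this]
            cases l2 with
            | nil =>
              cases htail
              simp only [show pvBStep (done, [(o, seg)]) c = (done ++ o :: (seg ++ [c]), []) by
                simp [pvBStep, hop, hcl, hmB]]
              refine ih (k + 1) (p ++ [(k, c)]) [] D (done ++ o :: (seg ++ [c])) []
                hpk (by simp) (fun j hj => hD j (by omega)) List.Forall₂.nil ?_
              intro q
              simp only [List.drop_nil, List.take_nil]
              rw [List.filterMap_append, hkeep [] (by simp)]
              have h2 := hkept 1
              simp only [List.drop_succ_cons, List.take_succ_cons, List.drop_nil,
                List.take_nil] at h2
              rw [h2, pvFulls_cons]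
              simp [pvSegs, pvFulls]
            | cons b2 l2' =>
              obtain ⟨ob2, seg2⟩ := b2
              cases htail
              rename_i a2 l1' hab2 htail2
              obtain ⟨o2, i2⟩ := a2
              obtain ⟨hoeq2, homem2⟩ := hab2
              simp only at hoeq2 homem2
              subst hoeq2
              simp only [show pvBStep (done, (o, seg) :: (o2, seg2) :: l2') c
                  = (done, (o2, seg2 ++ o :: (seg ++ [c])) :: l2') by
                simp [pvBStep, hop, hcl, hmB]]
              refine ih (k + 1) (p ++ [(k, c)]) ((o2, i2) :: l1') D done
                ((o2, seg2 ++ o :: (seg ++ [c])) :: l2')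
                hpk (fun e he => by have := hst e (List.mem_cons_of_mem _ he); omega)
                (fun j hj => hD j (by omega))
                (List.Forall₂.cons ⟨rfl, homem2⟩ htail2) ?_
              intro q
              cases q with
              | zero =>
                simp only [List.drop_zero, List.take_zero]
                rw [List.filterMap_append, hkeep ((o2, i2) :: l1') (fun e he => he)]
                have h2 := hkept 1
                simp only [List.drop_succ_cons, List.drop_zero, List.take_succ_cons,
                  List.take_zero] at h2
                rw [h2, pvFulls_cons, pvSegs_cons, pvSegs_cons]
                simp [pvFulls]
              | succ q =>
                simp only [List.drop_succ_cons, List.take_succ_cons]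
                rw [List.filterMap_append,
                  hkeep (l1'.drop q) (fun e he => List.mem_cons_of_mem _ (List.mem_of_mem_drop he))]
                have h2 := hkept (q + 2)
                simp only [List.drop_succ_cons, List.take_succ_cons] at h2
                rw [h2, pvFulls_cons, pvFulls_cons, pvFulls_cons]
                simp
          · -- non-matching closer: dropped on both sides
            simp only [show pvAStep ((o, i) :: l1, D) (k, c)
                = ((o, i) :: l1, fun j => if j = k then true else D j) by
              simp [pvAStep, hop, hcl, hm]]
            have hmB : ¬ (((pvBMatch.get? c).getD ' ') = o) :=
              fun h => hm ((pvMatch_iff o c homem hcl).2 h)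
            simp only [show pvBStep (done, (o, seg) :: l2) c = (done, (o, seg) :: l2) by
              simp [pvBStep, hop, hcl, hmB]]
            refine ih (k + 1) (p ++ [(k, c)]) ((o, i) :: l1) (fun j => if j = k then true else D j)
              done ((o, seg) :: l2)
              hpk (fun e he => by have := hst e he; omega) ?_
              (List.Forall₂.cons ⟨rfl, homem⟩ htail) ?_
            · intro j hj
              have hne : ¬ j = k := by omega
              simp [hne, hD j (by omega)]
            · intro q
              rw [List.filterMap_append]
              have h1 : List.filterMap (pvKill (fun j => if j = k then true else D j)
                  (((o, i) :: l1).drop q)) [((k : Int), c)] = [] := by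
                simp [pvKill]
              have h2 : List.filterMap (pvKill (fun j => if j = k then true else D j)
                  (((o, i) :: l1).drop q)) p
                  = List.filterMap (pvKill D (((o, i) :: l1).drop q)) p := by
                apply List.filterMap_congr
                intro ic hic
                exact pvKill_update D _ k ic (by have := hp ic hic; omega)
              rw [h1, h2, hkept q]
              simp
      · -- ordinary character: kept on both sides
        simp only [show pvAStep (stA, D) (k, c) = (stA, D) by simp [pvAStep, hop, hcl]]
        cases hrel with
        | nil =>
          simp only [show pvBStep (done, ([] : List (Char × List Char))) c = (done ++ [c], []) by
            simp [pvBStep, hop, hcl]]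
          refine ih (k + 1) (p ++ [(k, c)]) [] D (done ++ [c]) []
            hpk (by simp) (fun j hj => hD j (by omega)) List.Forall₂.nil ?_
          intro q
          simp only [List.drop_nil, List.take_nil]
          rw [List.filterMap_append]
          have h1 : List.filterMap (pvKill D ([] : List (Char × Int))) [((k : Int), c)] = [c] := by
            simp [pvKill_keep D [] k c hDk (by simp)]
          have h2 := hkept q
          simp only [List.drop_nil, List.take_nil] at h2
          rw [h1, h2]
          simp [pvSegs, pvFulls]
        | @cons a b l1 l2 hab htail =>
          obtain ⟨o, i⟩ := a
          obtain ⟨ob, seg⟩ := b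
          obtain ⟨hoeq, homem⟩ := hab
          simp only at hoeq homem
          subst hoeq
          simp only [show pvBStep (done, (o, seg) :: l2) c = (done, (o, seg ++ [c]) :: l2) by
            simp [pvBStep, hop, hcl]]
          refine ih (k + 1) (p ++ [(k, c)]) ((o, i) :: l1) D done ((o, seg ++ [c]) :: l2)
            hpk (fun e he => by have := hst e he; omega) (fun j hj => hD j (by omega))
            (List.Forall₂.cons ⟨rfl, homem⟩ htail) ?_
          intro q
          have hkeep : List.filterMap (pvKill D (((o, i) :: l1).drop q)) [((k : Int), c)] = [c] := by
            have := pvKill_keep D (((o, i) :: l1).drop q) k c hDk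
              (fun e he => by have := hst e (List.mem_of_mem_drop he); omega)
            simp [this]
          cases q with
          | zero =>
            simp only [List.drop_zero, List.take_zero] at hkeep ⊢
            rw [List.filterMap_append, hkeep]
            have h2 := hkept 0
            simp only [List.drop_zero, List.take_zero] at h2
            rw [h2, pvSegs_cons, pvSegs_cons]
            simp [pvFulls]
          | succ q =>
            simp only [List.drop_succ_cons, List.take_succ_cons] at hkeep ⊢
            rw [List.filterMap_append, hkeep]
            have h2 := hkept (q + 1)
            simp only [List.drop_succ_cons, List.take_succ_cons] at h2
            rw [h2, pvFulls_cons, pvFulls_cons]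
            simp

-- ===== VERDICT (by name: the statement is the Claim_ definition above) =====
theorem remove_unbalanced_braces_spec : Claim_equal_remove_unbalanced_braces := by
  intro s _
  show remove_unbalanced_braces s = remove_unbalanced_braces_alt s
  unfold remove_unbalanced_braces remove_unbalanced_braces_alt
  have h := pvMain s.toList 0 [] [] (fun _ => false) [] []
    (by simp) (by simp) (by simp) List.Forall₂.nil
    (by intro q; simp [pvSegs, pvFulls])
  simp only [List.nil_append] at h
  exact congrArg String.ofList h
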